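-- pv_equiv track=rewrite | github.com/Jolly-Incentineering/opportunity-analysis | scripts/template_scanner.py | _detect_template_type
-- ===== SOURCE A (Python) =====
-- from typing import Dict, Optional, Tuple
--
-- def _detect_template_type(labels: Dict[str, int]) -> str:
--     """Detect template type based on labels present"""
--     label_keys = {k.lower() for k in labels.keys()}
--
--     # Retail indicators (REI standard)
--     if any(x in label_keys for x in [
--         "member sign-ups",
--         "inventory accuracy",
--         "employee referrals",
--         "store count",
--         "annual new members"
--     ]):
--         return "Retail"
--
--     # Manufacturing indicators
--     if any(x in label_keys for x in ["units produced", "defect rate", "trir"]):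
--         return "Manufacturing"
--
--     # QSR indicators
--     if any(x in label_keys for x in [
--         "beverage contribution margin",
--         "orders per store per day",
--         "aov"
--     ]):
--         return "QSR"
--
--     # Automotive indicators
--     if any(x in label_keys for x in ["vehicle", "service", "repair"]):
--         return "Automotive"
--
--     return "Custom"
-- ===== SOURCE B (Python) =====
-- from typing import Dict, Optional, Tuple
--
-- # Inverted detection: instead of scanning indicator groups against a key set,
-- # scan the input keys once, map each lowercased key to the priority rank of the
-- # template it indicates (via a precomputed dict), and keep the minimum rank.
-- _NAMES = ("Retail", "Manufacturing", "QSR", "Automotive", "Custom")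
--
-- _RANK = {
--     "member sign-ups": 0, "inventory accuracy": 0, "employee referrals": 0,
--     "store count": 0, "annual new members": 0,
--     "units produced": 1, "defect rate": 1, "trir": 1,
--     "beverage contribution margin": 2, "orders per store per day": 2, "aov": 2,
--     "vehicle": 3, "service": 3, "repair": 3,
-- }
--
-- def _detect_template_type(labels: Dict[str, int]) -> str:
--     """Detect template type based on labels present"""
--     best = 4
--     for k in labels:
--         best = min(best, _RANK.get(k.lower(), 4))
--     return _NAMES[best]
-- ===== Notes on version B (the rewrite author's own statement) =====
-- stated objective: alternative
-- what changed: Inverts the traversal: instead of building a key set and testing four ordered indicator groups against it, B makes one pass over the label keys, maps each lowercased key to a priority rank via a precomputed indicator-to-rank dict, keeps the running minimum rank, and indexes a name table with it.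
import Mathlib
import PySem

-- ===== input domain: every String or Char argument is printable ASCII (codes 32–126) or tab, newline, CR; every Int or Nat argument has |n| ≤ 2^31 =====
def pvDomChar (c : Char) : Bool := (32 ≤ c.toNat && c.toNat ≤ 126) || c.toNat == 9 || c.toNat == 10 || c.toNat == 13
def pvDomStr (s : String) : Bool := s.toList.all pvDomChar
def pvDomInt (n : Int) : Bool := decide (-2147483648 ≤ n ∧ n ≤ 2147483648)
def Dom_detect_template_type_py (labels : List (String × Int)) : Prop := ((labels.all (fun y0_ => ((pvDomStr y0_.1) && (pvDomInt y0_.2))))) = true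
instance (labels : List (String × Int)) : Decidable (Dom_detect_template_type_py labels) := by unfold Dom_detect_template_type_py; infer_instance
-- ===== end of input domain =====

-- B inverts the traversal: one pass over the label keys keeping the minimum
-- priority rank from an indicator-to-rank dict, then indexing a name table
-- (objective: alternative decomposition, same cost).


-- ===== PORT A =====
def detect_template_type_py (labels : List (String × Int)) : String :=
  let label_keys : PySem.Set String :=
    PySem.Set.ofList (labels.map (fun kv => PySem.Str.lower kv.1))
  if ["member sign-ups", "inventory accuracy", "employee referrals",
      "store count", "annual new members"].any
       (fun x => PySem.Set.contains label_keys x) then "Retail"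
  else if ["units produced", "defect rate", "trir"].any
       (fun x => PySem.Set.contains label_keys x) then "Manufacturing"
  else if ["beverage contribution margin", "orders per store per day", "aov"].any
       (fun x => PySem.Set.contains label_keys x) then "QSR"
  else if ["vehicle", "service", "repair"].any
       (fun x => PySem.Set.contains label_keys x) then "Automotive"
  else "Custom"

-- ===== PORT B =====
-- the constant _NAMES tuple and _RANK dict of Source B
def pvNames : List String := ["Retail", "Manufacturing", "QSR", "Automotive", "Custom"]

def pvRankDict : PySem.Dict String Int :=
  PySem.Dict.ofList
    [("member sign-ups", 0), ("inventory accuracy", 0), ("employee referrals", 0),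
     ("store count", 0), ("annual new members", 0),
     ("units produced", 1), ("defect rate", 1), ("trir", 1),
     ("beverage contribution margin", 2), ("orders per store per day", 2), ("aov", 2),
     ("vehicle", 3), ("service", 3), ("repair", 3)]

-- the 'for k in labels: best = min(best, _RANK.get(k.lower(), 4))' loop, then _NAMES[best]
def detect_template_type_py_alt (labels : List (String × Int)) : String :=
  let best : Int :=
    labels.foldl (fun best kv => min best (PySem.Dict.getD pvRankDict (PySem.Str.lower kv.1) 4)) 4
  (PySem.List.pyGet? pvNames best).getD ""   -- 0 ≤ best ≤ 4 always, so _NAMES[best] never raises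

-- ===== PRECONDITION & SPEC =====
def Spec_detect_template_type_py (labels : List (String × Int)) (out : String) : Prop := out = detect_template_type_py_alt labels
instance (labels : List (String × Int)) (out : String) : Decidable (Spec_detect_template_type_py labels out) := by unfold Spec_detect_template_type_py; infer_instance

-- ===== CLAIM (what is proved, stated in full; the proofs are below) =====
def Claim_equal_detect_template_type_py : Prop := ∀ (labels : List (String × Int)), Dom_detect_template_type_py labels → Spec_detect_template_type_py labels (detect_template_type_py labels)

-- ===== LEMMAS AND PROOFS =====

-- the four indicator groups, in A's priority order
def pvG : Nat → List String
  | 0 => ["member sign-ups", "inventory accuracy", "employee referrals",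
          "store count", "annual new members"]
  | 1 => ["units produced", "defect rate", "trir"]
  | 2 => ["beverage contribution margin", "orders per store per day", "aov"]
  | _ => ["vehicle", "service", "repair"]

-- rank lookup characterised by group membership
theorem pvRank_eq (y : String) :
    PySem.Dict.getD pvRankDict y 4 =
      if y ∈ pvG 0 then 0 else if y ∈ pvG 1 then 1
      else if y ∈ pvG 2 then 2 else if y ∈ pvG 3 then 3 else 4 := by
  have h : pvRankDict = PySem.Dict.mk
    [("member sign-ups", 0), ("inventory accuracy", 0), ("employee referrals", 0),
     ("store count", 0), ("annual new members", 0),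
     ("units produced", 1), ("defect rate", 1), ("trir", 1),
     ("beverage contribution margin", 2), ("orders per store per day", 2), ("aov", 2),
     ("vehicle", 3), ("service", 3), ("repair", 3)] := by decide
  by_cases h0 : y = "member sign-ups"
  · subst h0; decide
  by_cases h1 : y = "inventory accuracy"
  · subst h1; decide
  by_cases h2 : y = "employee referrals"
  · subst h2; decide
  by_cases h3 : y = "store count"
  · subst h3; decide
  by_cases h4 : y = "annual new members"
  · subst h4; decide
  by_cases h5 : y = "units produced"
  · subst h5; decide
  by_cases h6 : y = "defect rate"
  · subst h6; decide
  by_cases h7 : y = "trir"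
  · subst h7; decide
  by_cases h8 : y = "beverage contribution margin"
  · subst h8; decide
  by_cases h9 : y = "orders per store per day"
  · subst h9; decide
  by_cases h10 : y = "aov"
  · subst h10; decide
  by_cases h11 : y = "vehicle"
  · subst h11; decide
  by_cases h12 : y = "service"
  · subst h12; decide
  by_cases h13 : y = "repair"
  · subst h13; decide
  rw [h]
  simp only [PySem.Dict.getD, PySem.Dict.get?_mk_cons, pvG, List.mem_cons, List.not_mem_nil, or_false]
  simp [PySem.Dict.get?, h0, h1, h2, h3, h4, h5, h6, h7, h8, h9, h10, h11, h12, h13, Ne.symm, beq_iff_eq]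

-- the value A's branch structure selects, as a function of the lowered key list
def pvTab (L : List String) : Int :=
  if ∃ y ∈ L, y ∈ pvG 0 then 0 else if ∃ y ∈ L, y ∈ pvG 1 then 1
  else if ∃ y ∈ L, y ∈ pvG 2 then 2 else if ∃ y ∈ L, y ∈ pvG 3 then 3 else 4

theorem pvTab_cons (y : String) (L : List String) :
    pvTab (y :: L) = min (PySem.Dict.getD pvRankDict y 4) (pvTab L) := by
  unfold pvTab
  rw [pvRank_eq]
  simp only [List.exists_mem_cons_iff]
  by_cases a0 : y ∈ pvG 0 <;> by_cases a1 : y ∈ pvG 1 <;>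
  by_cases a2 : y ∈ pvG 2 <;> by_cases a3 : y ∈ pvG 3 <;>
  by_cases e0 : ∃ z ∈ L, z ∈ pvG 0 <;> by_cases e1 : ∃ z ∈ L, z ∈ pvG 1 <;>
  by_cases e2 : ∃ z ∈ L, z ∈ pvG 2 <;> by_cases e3 : ∃ z ∈ L, z ∈ pvG 3 <;>
  simp [a0, a1, a2, a3, e0, e1, e2, e3]

theorem pvTab_bounds (L : List String) : 0 ≤ pvTab L ∧ pvTab L ≤ 4 := by
  unfold pvTab; split_ifs <;> omega

-- B's min-fold computes pvTab
theorem pvLoop_eq (L : List String) (a : Int) (ha : a ≤ 4) :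
    L.foldl (fun b y => min b (PySem.Dict.getD pvRankDict y 4)) a = min a (pvTab L) := by
  induction L generalizing a with
  | nil => simp [pvTab]; omega
  | cons y L ih =>
      have hb := pvTab_bounds L
      have hr := pvRank_eq y
      have hr4 : PySem.Dict.getD pvRankDict y 4 ≤ 4 := by rw [hr]; split_ifs <;> omega
      simp only [List.foldl_cons]
      rw [ih _ (by omega), pvTab_cons]
      omega

-- ===== VERDICT (by name: the statement is the Claim_ definition above) =====
theorem detect_template_type_py_spec : Claim_equal_detect_template_type_py := by
  intro labels _
  unfold Spec_detect_template_type_py detect_template_type_py detect_template_type_py_alt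
  have hfold : labels.foldl (fun best kv => min best (PySem.Dict.getD pvRankDict (PySem.Str.lower kv.1) 4)) 4
      = pvTab (labels.map (fun kv => PySem.Str.lower kv.1)) := by
    calc labels.foldl (fun best kv => min best (PySem.Dict.getD pvRankDict (PySem.Str.lower kv.1) 4)) 4
        = (labels.map (fun kv => PySem.Str.lower kv.1)).foldl
            (fun b y => min b (PySem.Dict.getD pvRankDict y 4)) 4 := by rw [List.foldl_map]
      _ = min 4 (pvTab (labels.map (fun kv => PySem.Str.lower kv.1))) := pvLoop_eq _ 4 (by norm_num)
      _ = pvTab (labels.map (fun kv => PySem.Str.lower kv.1)) := min_eq_right (pvTab_bounds _).2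
  rw [hfold]
  set L := labels.map (fun kv => PySem.Str.lower kv.1) with hL
  by_cases e0 : ∃ y ∈ L, y ∈ pvG 0 <;> by_cases e1 : ∃ y ∈ L, y ∈ pvG 1 <;>
  by_cases e2 : ∃ y ∈ L, y ∈ pvG 2 <;> by_cases e3 : ∃ y ∈ L, y ∈ pvG 3 <;>
  (simp [pvG, and_or_left, exists_or] at e0 e1 e2 e3;
   simp [pvTab, pvG, and_or_left, exists_or, e0, e1, e2, e3, pvNames, PySem.List.pyGet?]) <;> decide
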